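-- pv_equiv track=rewrite | github.com/smouni001/HACHETTE | idp470_pipeline/cobol_layout_parser.py | _expand_picture
-- ===== SOURCE A (Python) =====
-- def _expand_picture(pattern: str) -> list[str]:
--     compact = pattern.replace(" ", "").rstrip(".")
--     tokens: list[str] = []
--     index = 0
--
--     while index < len(compact):
--         token = compact[index].upper()
--         if token in {"'", '"'}:
--             index += 1
--             continue
--
--         if index + 1 < len(compact) and compact[index + 1] == "(":
--             close = compact.find(")", index + 2)
--             if close != -1:
--                 repeat_raw = compact[index + 2 : close]
--                 if repeat_raw.isdigit():
--                     tokens.extend([token] * int(repeat_raw))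
--                     index = close + 1
--                     continue
--
--         tokens.append(token)
--         index += 1
--
--     return tokens
-- ===== SOURCE B (Python) =====
-- import re
--
-- _TOKEN_RE = re.compile(r"(['\"])|([\s\S])(?:\((\d+)\))?")
--
-- def _expand_picture(pattern: str) -> list[str]:
--     compact = pattern.replace(" ", "").rstrip(".")
--     tokens: list[str] = []
--     for match in _TOKEN_RE.finditer(compact):
--         if match.group(1) is not None:
--             continue  # quote: skipped
--         token = match.group(2).upper()
--         count = match.group(3)
--         if count is not None:
--             tokens.extend([token] * int(count))
--         else:
--             tokens.append(token)
--     return tokens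
-- ===== Notes on version B (the rewrite author's own statement) =====
-- stated objective: idiomatic
-- what changed: Replaces A's manual index/str.find scan (with nested fall-through ifs) by a single regex finditer pass whose optional optional parenthesized repeat-count group handles the repeat count and whose quote alternative handles the skip.
import Mathlib
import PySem

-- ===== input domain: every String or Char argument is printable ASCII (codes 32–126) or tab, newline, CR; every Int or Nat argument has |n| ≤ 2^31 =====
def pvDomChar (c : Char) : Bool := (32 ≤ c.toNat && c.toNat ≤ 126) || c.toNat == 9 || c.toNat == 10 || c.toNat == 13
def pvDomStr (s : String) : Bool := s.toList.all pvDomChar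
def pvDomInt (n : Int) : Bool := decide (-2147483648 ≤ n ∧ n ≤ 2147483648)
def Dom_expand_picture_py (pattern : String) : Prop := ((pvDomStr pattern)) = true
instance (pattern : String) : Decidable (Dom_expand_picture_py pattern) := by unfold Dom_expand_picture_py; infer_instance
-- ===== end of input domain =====

-- B re-tokenizes the compacted PICTURE string with a single regex-style scan (one char plus an
-- optional parenthesized repeat-count group per step) instead of A's manual index/find loop; objective: idiomatic.


-- ===== PORT A =====
-- pattern.rstrip(".") : drop all trailing '.' characters (exact for a one-char strip set)
def pvRstripDot (cs : List Char) : List Char := (cs.reverse.dropWhile (· == '.')).reverse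

-- the while loop of A: index-driven scan; the nested fall-through ifs of the '(n)' branch are
-- flattened into one conjunction guarding the 'extend' arm (the else arm is the shared fall-through)
def aLoop (compact : List Char) (index : Nat) (tokens : List String) : List String :=
  if hlt : index < compact.length then
    if compact[index]'hlt = '\'' ∨ compact[index]'hlt = '"' then
      aLoop compact (index + 1) tokens
    else
      if hok : (index + 1 < compact.length ∧ compact[index+1]? = some '(')
            ∧ PySem.Chars.findFrom compact [')'] ((index+2 : Nat) : Int) none ≠ -1
            ∧ PySem.Chars.strIsdigit (PySem.List.slice compact (some ((index+2 : Nat) : Int))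
                (some (PySem.Chars.findFrom compact [')'] ((index+2 : Nat) : Int) none))) = true then
        -- repeat_raw.isdigit() guarantees int(repeat_raw) parses, so getD 0 is never the default
        aLoop compact ((PySem.Chars.findFrom compact [')'] ((index+2 : Nat) : Int) none).toNat + 1)
          (tokens ++ List.replicate ((PySem.Int.ofChars? (PySem.List.slice compact
              (some ((index+2 : Nat) : Int))
              (some (PySem.Chars.findFrom compact [')'] ((index+2 : Nat) : Int) none)))).getD 0).toNat
            (String.ofList [PySem.Chars.upperChar (compact[index]'hlt)]))
      else
        aLoop compact (index + 1) (tokens ++ [String.ofList [PySem.Chars.upperChar (compact[index]'hlt)]])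
  else tokens
termination_by compact.length - index
decreasing_by
  · omega
  · have h2 : index + 2 ≤ compact.length := by omega
    have hs := PySem.Chars.findFrom_natCast_spec compact [')'] (index+2) h2 hok.2.1
    omega
  · omega

def expand_picture_py (pattern : String) : List String :=
  aLoop (pvRstripDot (PySem.Chars.replace pattern.toList [' '] [])) 0 []

-- ===== PORT B =====
-- hand port of Source B's regex scan (no regex engine in Lean): each finditer match consumes a quote
-- (skipped) or one char plus, when the optional greedy group (\d+) followed by ')' matches, that
-- '(digits)' suffix; exact for the regex (['"])|([\s\S])(?:\((\d+)\))?
def bGo : List Char → List String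
  | [] => []
  | c :: rest =>
    if c = '\'' ∨ c = '"' then bGo rest
    else
      if h1 : rest.head? = some '(' then
        if rest.tail.takeWhile PySem.Chars.isdigit ≠ [] ∧
            (rest.tail.dropWhile PySem.Chars.isdigit).head? = some ')' then
          List.replicate ((PySem.Int.ofChars? (rest.tail.takeWhile PySem.Chars.isdigit)).getD 0).toNat
              (String.ofList [PySem.Chars.upperChar c]) ++
            bGo (rest.tail.dropWhile PySem.Chars.isdigit).tail
        else String.ofList [PySem.Chars.upperChar c] :: bGo rest
      else String.ofList [PySem.Chars.upperChar c] :: bGo rest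
termination_by cs => cs.length
decreasing_by
  · simp
  · have hd := List.length_dropWhile_le PySem.Chars.isdigit rest.tail
    have ht := List.length_tail (l := rest.tail.dropWhile PySem.Chars.isdigit)
    have hr : rest ≠ [] := by intro h; simp [h] at h1
    have : rest.tail.length + 1 = rest.length := by
      cases rest with | nil => exact absurd rfl hr | cons x xs => simp
    simp only [List.length_cons]; omega
  · simp
  · simp

def expand_picture_py_alt (pattern : String) : List String :=
  bGo (pvRstripDot (PySem.Chars.replace pattern.toList [' '] []))

-- ===== PRECONDITION & SPEC =====
def Spec_expand_picture_py (pattern : String) (out : List String) : Prop := out = expand_picture_py_alt pattern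
instance (pattern : String) (out : List String) : Decidable (Spec_expand_picture_py pattern out) := by unfold Spec_expand_picture_py; infer_instance

-- ===== CLAIM (what is proved, stated in full; the proofs are below) =====
def Claim_equal_expand_picture_py : Prop := ∀ (pattern : String), Dom_expand_picture_py pattern → Spec_expand_picture_py pattern (expand_picture_py pattern)

-- ===== LEMMAS AND PROOFS =====

-- if everything takeWhile p keeps satisfies q and the first char dropWhile p exposes fails q,
-- then q and p split the list at the same point
lemma span_congr (p q : Char → Bool) (cs : List Char)
    (h1 : ∀ c ∈ cs.takeWhile p, q c = true)
    (h2 : ∀ x, (cs.dropWhile p).head? = some x → q x = false) :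
    cs.takeWhile q = cs.takeWhile p ∧ cs.dropWhile q = cs.dropWhile p := by
  induction cs with
  | nil => simp
  | cons c cs ih =>
    by_cases hp : p c
    · have hq : q c = true := h1 c (by simp [List.takeWhile_cons, hp])
      have := ih (fun x hx => h1 x (by simp [List.takeWhile_cons, hp, hx]))
        (fun x hx => h2 x (by simpa [List.dropWhile_cons, hp] using hx))
      simp [List.takeWhile_cons, List.dropWhile_cons, hp, hq, this.1, this.2]
    · have hq : q c = false := h2 c (by simp [List.dropWhile_cons, hp])
      simp [List.takeWhile_cons, List.dropWhile_cons, hp, hq]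

-- a singleton is a prefix iff it is the head
lemma singleton_prefix_iff (x : Char) (l : List Char) : [x] <+: l ↔ l.head? = some x := by
  constructor
  · rintro ⟨r, rfl⟩; simp
  · intro h
    cases l with
    | nil => simp at h
    | cons y ys => simp at h; exact ⟨ys, by simp [h]⟩

-- head of dropWhile (· ≠ x) is x when x occurs
lemma head?_dropWhile_ne (cs : List Char) (x : Char) (hmem : x ∈ cs) :
    (cs.dropWhile (· ≠ x)).head? = some x := by
  have hne : cs.dropWhile (fun c => decide (c ≠ x)) ≠ [] := by
    intro h
    have := List.dropWhile_eq_nil_iff.mp h x hmem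
    simp at this
  have hh := List.head_dropWhile_not (fun c => decide (c ≠ x)) hne
  simp only [decide_eq_false_iff_not, not_not] at hh
  rw [List.head?_eq_head hne, hh]

-- splitting cs at the length of takeWhile p recovers dropWhile p
lemma drop_length_takeWhile (p : Char → Bool) (cs : List Char) :
    cs.drop (cs.takeWhile p).length = cs.dropWhile p := by
  have h : ((cs.takeWhile p) ++ (cs.dropWhile p)).drop (cs.takeWhile p).length = cs.dropWhile p :=
    List.drop_left
  rwa [List.takeWhile_append_dropWhile] at h

-- find of a single char = length of the prefix of other chars, when the char occurs
lemma find_close (cs : List Char) (x : Char) (hmem : x ∈ cs) :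
    PySem.Chars.find cs [x] = ((cs.takeWhile (· ≠ x)).length : Int) := by
  have hinf : [x] <:+: cs := by
    obtain ⟨s, t, rfl⟩ := List.mem_iff_append.mp hmem
    exact ⟨s, t, by simp⟩
  have h0 : 0 ≤ PySem.Chars.find cs [x] := (PySem.Chars.find_nonneg_iff cs [x]).mpr hinf
  obtain ⟨hpref, hmin⟩ := PySem.Chars.find_spec h0
  have hxf : cs[(PySem.Chars.find cs [x]).toNat]? = some x := by
    rw [← List.head?_drop]; exact (singleton_prefix_iff x _).mp hpref
  have hle1 : (cs.takeWhile (· ≠ x)).length ≤ (PySem.Chars.find cs [x]).toNat := by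
    by_contra hlt
    push_neg at hlt
    have ht : cs.takeWhile (fun c => decide (c ≠ x)) = cs.take (cs.takeWhile (fun c => decide (c ≠ x))).length :=
      List.prefix_iff_eq_take.mp (List.takeWhile_prefix _)
    have hx_mem : x ∈ cs.takeWhile (fun c => decide (c ≠ x)) := by
      rw [ht]
      have : (cs.take (cs.takeWhile (fun c => decide (c ≠ x))).length)[(PySem.Chars.find cs [x]).toNat]? = some x := by
        rw [List.getElem?_take_of_lt hlt]; exact hxf
      exact List.mem_of_getElem? this
    have := List.mem_takeWhile_imp hx_mem
    simp at this
  have hle2 : (PySem.Chars.find cs [x]).toNat ≤ (cs.takeWhile (· ≠ x)).length := by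
    by_contra hlt
    push_neg at hlt
    refine hmin (cs.takeWhile (fun c => decide (c ≠ x))).length hlt ?_
    rw [singleton_prefix_iff, drop_length_takeWhile]
    exact head?_dropWhile_ne cs x hmem
  omega

lemma aLoop_eq_bGo (n : Nat) : ∀ (compact : List Char) (index : Nat) (tokens : List String),
    compact.length - index ≤ n →
    aLoop compact index tokens = tokens ++ bGo (compact.drop index) := by
  induction n with
  | zero =>
    intro compact index tokens hn
    have hge : compact.length ≤ index := by omega
    rw [aLoop]
    simp [Nat.not_lt.mpr hge, List.drop_eq_nil_iff.mpr hge, bGo]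
  | succ n ih =>
    intro compact index tokens hn
    by_cases hlt : index < compact.length
    · rw [aLoop]
      rw [dif_pos hlt]
      have hdrop : compact.drop index = compact[index] :: compact.drop (index+1) :=
        (List.getElem_cons_drop hlt).symm
      rw [hdrop, bGo]
      by_cases hq : compact[index] = '\'' ∨ compact[index] = '"'
      · rw [if_pos hq, if_pos hq]
        exact ih compact (index+1) tokens (by omega)
      · rw [if_neg hq, if_neg hq]
        by_cases hp : (compact.drop (index+1)).head? = some '('
        · -- the next char is '('
          have hget1 : compact[index+1]? = some '(' := by rw [← List.head?_drop]; exact hp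
          obtain ⟨h1len, -⟩ := List.getElem?_eq_some_iff.mp hget1
          have h2 : index + 2 ≤ compact.length := by omega
          have htail : (compact.drop (index+1)).tail = compact.drop (index+2) :=
            (List.drop_add_one_eq_tail_drop ..).symm
          have hff := PySem.Chars.findFrom_natCast compact [')'] (index+2) h2
          by_cases hB : (compact.drop (index+2)).takeWhile PySem.Chars.isdigit ≠ [] ∧
              ((compact.drop (index+2)).dropWhile PySem.Chars.isdigit).head? = some ')'
          · -- B's repeat-count group matches; show A's branch fires and both jump past it
            obtain ⟨hd, ha⟩ := hB
            have hmemA : ')' ∈ (compact.drop (index+2)).dropWhile PySem.Chars.isdigit :=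
              List.mem_of_mem_head? (by rw [ha]; simp)
            have hmem : ')' ∈ compact.drop (index+2) :=
              (List.dropWhile_sublist _).subset hmemA
            have hspan := span_congr PySem.Chars.isdigit (fun c => decide (c ≠ ')'))
              (compact.drop (index+2))
              (fun c hc => by
                have := List.mem_takeWhile_imp hc
                simp only [decide_eq_true_eq]
                intro hcc; rw [hcc] at this; exact absurd this (by decide))
              (fun x hx => by rw [ha] at hx; injection hx with hx; rw [← hx]; decide)
            have hf := find_close (compact.drop (index+2)) ')' hmem
            rw [hspan.1] at hf
            have hfne : PySem.Chars.find (compact.drop (index+2)) [')'] ≠ -1 := by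
              rw [hf]; omega
            have hffv : PySem.Chars.findFrom compact [')'] ((index+2 : Nat) : Int) none =
                ((index+2 : Nat) : Int) +
                  (((compact.drop (index+2)).takeWhile PySem.Chars.isdigit).length : Int) := by
              rw [hff, if_neg hfne, hf]
            have hslice : PySem.List.slice compact (some ((index+2 : Nat) : Int))
                (some (PySem.Chars.findFrom compact [')'] ((index+2 : Nat) : Int) none)) =
                (compact.drop (index+2)).takeWhile PySem.Chars.isdigit := by
              rw [hffv]
              rw [show ((index+2 : Nat) : Int) +
                    (((compact.drop (index+2)).takeWhile PySem.Chars.isdigit).length : Int) =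
                  (((index+2 : Nat) : Int) +
                    ((((compact.drop (index+2)).takeWhile PySem.Chars.isdigit).length : Nat) : Int))
                from by push_cast; ring]
              rw [PySem.List.slice_natCast_add]
              exact (List.prefix_iff_eq_take.mp (List.takeWhile_prefix _)).symm
            have hdig : PySem.Chars.strIsdigit
                ((compact.drop (index+2)).takeWhile PySem.Chars.isdigit) = true := by
              simp only [PySem.Chars.strIsdigit, Bool.and_eq_true, Bool.not_eq_true',
                List.isEmpty_eq_false_iff, List.all_eq_true]
              exact ⟨hd, fun c hc => List.mem_takeWhile_imp hc⟩
            have hok : (index + 1 < compact.length ∧ compact[index+1]? = some '(')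
                ∧ PySem.Chars.findFrom compact [')'] ((index+2 : Nat) : Int) none ≠ -1
                ∧ PySem.Chars.strIsdigit (PySem.List.slice compact (some ((index+2 : Nat) : Int))
                    (some (PySem.Chars.findFrom compact [')'] ((index+2 : Nat) : Int) none))) = true := by
              refine ⟨⟨h1len, hget1⟩, ?_, ?_⟩
              · rw [hffv]; omega
              · rw [hslice]; exact hdig
            rw [dif_pos hok, dif_pos hp, htail, if_pos ⟨hd, ha⟩, hslice, hffv]
            have hidx : (((index+2 : Nat) : Int) +
                (((compact.drop (index+2)).takeWhile PySem.Chars.isdigit).length : Int)).toNat + 1 =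
                index + 2 + ((compact.drop (index+2)).takeWhile PySem.Chars.isdigit).length + 1 := by
              omega
            rw [hidx, ih compact _ _ (by omega)]
            have hrest3 : compact.drop
                (index + 2 + ((compact.drop (index+2)).takeWhile PySem.Chars.isdigit).length + 1) =
                ((compact.drop (index+2)).dropWhile PySem.Chars.isdigit).tail := by
              rw [← drop_length_takeWhile PySem.Chars.isdigit (compact.drop (index+2)),
                ← List.drop_add_one_eq_tail_drop]
              simp only [List.drop_drop]
              congr 1
            rw [hrest3, List.append_assoc]
          · -- B's group does not match: A's guarded branch cannot fire either
            have hnok : ¬ ((index + 1 < compact.length ∧ compact[index+1]? = some '(')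
                ∧ PySem.Chars.findFrom compact [')'] ((index+2 : Nat) : Int) none ≠ -1
                ∧ PySem.Chars.strIsdigit (PySem.List.slice compact (some ((index+2 : Nat) : Int))
                    (some (PySem.Chars.findFrom compact [')'] ((index+2 : Nat) : Int) none))) = true) := by
              rintro ⟨-, hfne, hdig⟩
              rw [hff] at hfne hdig
              have hfind : PySem.Chars.find (compact.drop (index+2)) [')'] ≠ -1 := by
                intro h; rw [if_pos h] at hfne; exact hfne rfl
              rw [if_neg hfind] at hdig
              have hmem : ')' ∈ compact.drop (index+2) := by
                have hinf := (PySem.Chars.find_ne_neg_one_iff _ _).mp hfind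
                exact hinf.mem (by simp)
              have hf := find_close (compact.drop (index+2)) ')' hmem
              have hslice : PySem.List.slice compact (some ((index+2 : Nat) : Int))
                  (some (((index+2 : Nat) : Int) + PySem.Chars.find (compact.drop (index+2)) [')'])) =
                  (compact.drop (index+2)).takeWhile (fun c => decide (c ≠ ')')) := by
                rw [hf]
                rw [PySem.List.slice_natCast_add]
                exact (List.prefix_iff_eq_take.mp (List.takeWhile_prefix _)).symm
              rw [hslice] at hdig
              simp only [PySem.Chars.strIsdigit, Bool.and_eq_true, Bool.not_eq_true',
                List.isEmpty_eq_false_iff, List.all_eq_true] at hdig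
              have hspan := span_congr (fun c => decide (c ≠ ')')) PySem.Chars.isdigit
                (compact.drop (index+2)) hdig.2
                (fun x hx => by
                  rw [head?_dropWhile_ne _ ')' hmem] at hx
                  injection hx with hx; rw [← hx]; decide)
              refine hB ⟨?_, ?_⟩
              · rw [hspan.1]; exact hdig.1
              · rw [hspan.2]; exact head?_dropWhile_ne _ ')' hmem
            rw [dif_neg hnok, dif_pos hp, htail, if_neg hB,
              ih compact (index+1) _ (by omega), List.append_assoc]
            rfl
        · -- next char is not '(' (or the string ends): both sides emit the single token
          have hnok : ¬ ((index + 1 < compact.length ∧ compact[index+1]? = some '(')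
              ∧ PySem.Chars.findFrom compact [')'] ((index+2 : Nat) : Int) none ≠ -1
              ∧ PySem.Chars.strIsdigit (PySem.List.slice compact (some ((index+2 : Nat) : Int))
                  (some (PySem.Chars.findFrom compact [')'] ((index+2 : Nat) : Int) none))) = true) := by
            rintro ⟨⟨-, hget1⟩, -, -⟩
            exact hp (by rw [List.head?_drop]; exact hget1)
          rw [dif_neg hnok, dif_neg hp, ih compact (index+1) _ (by omega), List.append_assoc]
          rfl
    · rw [aLoop]
      have hge : compact.length ≤ index := by omega
      simp [hlt, List.drop_eq_nil_iff.mpr hge, bGo]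

-- ===== VERDICT (by name: the statement is the Claim_ definition above) =====
theorem expand_picture_py_spec : Claim_equal_expand_picture_py := by
  intro pattern _
  unfold Spec_expand_picture_py expand_picture_py expand_picture_py_alt
  simpa using aLoop_eq_bGo _ _ 0 [] le_rfl
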